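-- pv_equiv track=rewrite | github.com/hoangvunghi/hrm | leave/views.py | validate_to_update
-- ===== SOURCE A (Python) =====
-- def validate_to_update(obj, data):
--     errors = {}
--     allowed_fields = ['LeaveRequestID', 'EmpID']
--     date_fields = ['LeaveStartDate', 'LeaveEndDate']
--
--     for key in data:
--         value = data[key]
--
--         if key in date_fields:
--             try:
--                 day, month, year = map(int, value.split('/'))
--                 data[key] = f"{year:04d}-{month:02d}-{day:02d}"
--             except (ValueError, IndexError):
--                 errors[key] = f"Invalid date format for {key}. It must be in dd/mm/yyyy format."
--
--         if key in allowed_fields: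
--             errors[key] = f"{key} not allowed to change"
--
--     return errors
-- ===== SOURCE B (Python) =====
-- def _reformat(value):
--     """Reformat 'dd/mm/yyyy' to 'yyyy-mm-dd'; None if it does not parse."""
--     try:
--         day, month, year = map(int, value.split('/'))
--     except ValueError:
--         return None
--     return f"{year:04d}-{month:02d}-{day:02d}"
--
--
-- def _classify(key, value):
--     """The error message this entry contributes, or None."""
--     if key in ('LeaveRequestID', 'EmpID'):
--         return f"{key} not allowed to change"
--     if key in ('LeaveStartDate', 'LeaveEndDate') and _reformat(value) is None:
--         return f"Invalid date format for {key}. It must be in dd/mm/yyyy format."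
--     return None
--
--
-- def validate_to_update(obj, data):
--     errors = {k: e for k, v in list(data.items()) if (e := _classify(k, v)) is not None}
--     # same in-place mutation as the original: rewrite well-formed dates
--     for key in ('LeaveStartDate', 'LeaveEndDate'):
--         if key in data and key not in errors:
--             data[key] = _reformat(data[key])
--     return errors
-- ===== Notes on version B (the rewrite author's own statement) =====
-- stated objective: alternative
-- what changed: A interleaves validation and error insertion in one imperative loop with two independent if-blocks and a try/except per key; B factors the work into a pure per-entry classifier and builds the errors dict in a single comprehension (filterMap), performing the date rewrite afterwards only for the two known date keys.
import Mathlib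
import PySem

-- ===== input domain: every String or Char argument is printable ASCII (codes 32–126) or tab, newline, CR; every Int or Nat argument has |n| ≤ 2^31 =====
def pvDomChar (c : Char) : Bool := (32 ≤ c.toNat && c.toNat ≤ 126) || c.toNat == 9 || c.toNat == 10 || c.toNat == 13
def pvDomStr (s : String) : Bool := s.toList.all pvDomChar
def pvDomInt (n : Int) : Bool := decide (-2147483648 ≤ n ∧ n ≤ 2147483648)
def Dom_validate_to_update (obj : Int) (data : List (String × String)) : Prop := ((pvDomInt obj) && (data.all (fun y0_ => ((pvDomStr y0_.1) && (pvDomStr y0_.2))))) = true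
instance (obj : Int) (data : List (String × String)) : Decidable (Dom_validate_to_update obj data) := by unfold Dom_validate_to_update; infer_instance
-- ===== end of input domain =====

-- B replaces A's imperative loop (per-key try/except + two if-blocks inserting into an errors dict)
-- by a pure per-entry classifier and one comprehension/filterMap pass; both Pythons also mutate the
-- `data` dict in place identically (reformatting valid dates) — that side effect is dropped in these
-- pure ports and the equivalence proved is about the RETURN value (the errors dict).

-- shared primitive: day, month, year = map(int, value.split('/')) — some iff exactly 3 '/'-fields, all int()-parsable
def pvParseDMY? (value : String) : Option (Int × Int × Int) :=
  match PySem.Str.split? value "/" with  -- sep "/" ≠ "": split? never returns none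
  | some [d, m, y] =>
    match PySem.Int.ofStr? d, PySem.Int.ofStr? m, PySem.Int.ofStr? y with
    | some a, some b, some c => some (a, b, c)
    | _, _, _ => none
  | _ => none

-- ===== PORT A =====
-- `for key in data: value = data[key]` over a Python dict = fold over the dict's items
-- (Dict.ofList data is the dict the Python receives); the `data[key] = f"...-..-.."` write-back on a
-- successful parse mutates the argument only (each key is read once, before its own write-back), so
-- the pure port keeps the parse (its success/failure drives the except branch) and drops the write.
def validate_to_update (obj : Int) (data : List (String × String)) : List (String × String) :=
  let errors : PySem.Dict String String := PySem.Dict.empty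
  let errors := (PySem.Dict.ofList data).items.foldl (fun errors kv =>
    let key := kv.1
    let value := kv.2
    let errors :=
      if key ∈ (["LeaveStartDate", "LeaveEndDate"] : List String) then
        match pvParseDMY? value with
        | some _ => errors  -- try succeeds: only the in-place write-back happens
        | none => errors.insert key ("Invalid date format for " ++ key ++ ". It must be in dd/mm/yyyy format.")
      else errors
    if key ∈ (["LeaveRequestID", "EmpID"] : List String) then
      errors.insert key (key ++ " not allowed to change")
    else errors) errors
  errors.items

-- ===== PORT B =====
-- _reformat: the reformatted date or none (the write-back consumer is dropped as in port A)
def pvReformat? (value : String) : Option String :=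
  match pvParseDMY? value with
  | none => none
  | some (day, month, year) =>
      some (PySem.Str.zfill (PySem.Int.toStr year) 4 ++ "-" ++
            PySem.Str.zfill (PySem.Int.toStr month) 2 ++ "-" ++
            PySem.Str.zfill (PySem.Int.toStr day) 2)

-- _classify: the error message this entry contributes, or none
def pvClassify? (key value : String) : Option String :=
  if key ∈ (["LeaveRequestID", "EmpID"] : List String) then
    some (key ++ " not allowed to change")
  else if key ∈ (["LeaveStartDate", "LeaveEndDate"] : List String) ∧ (pvReformat? value).isNone then
    some ("Invalid date format for " ++ key ++ ". It must be in dd/mm/yyyy format.")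
  else none

-- the comprehension {k: e for k, v in data.items() if (e := _classify(k, v)) is not None}:
-- dict keys are distinct, so the built dict's items are exactly this filterMap
def validate_to_update_alt (obj : Int) (data : List (String × String)) : List (String × String) :=
  (PySem.Dict.ofList data).items.filterMap (fun kv => (pvClassify? kv.1 kv.2).map (fun e => (kv.1, e)))

-- ===== PRECONDITION & SPEC =====
def Spec_validate_to_update (obj : Int) (data : List (String × String)) (out : List (String × String)) : Prop := out = validate_to_update_alt obj data
instance (obj : Int) (data : List (String × String)) (out : List (String × String)) : Decidable (Spec_validate_to_update obj data out) := by unfold Spec_validate_to_update; infer_instance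

-- ===== CLAIM (what is proved, stated in full; the proofs are below) =====
def Claim_equal_validate_to_update : Prop := ∀ (obj : Int) (data : List (String × String)), Dom_validate_to_update obj data → Spec_validate_to_update obj data (validate_to_update obj data)

-- ===== LEMMAS AND PROOFS =====

-- one loop iteration of A = insert of B's classification (the two checks are on disjoint key sets)
lemma pv_step_eq (errors : PySem.Dict String String) (kv : String × String) :
    (if kv.1 ∈ (["LeaveRequestID", "EmpID"] : List String) then
      (if kv.1 ∈ (["LeaveStartDate", "LeaveEndDate"] : List String) then
        match pvParseDMY? kv.2 with
        | some _ => errors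
        | none => errors.insert kv.1 ("Invalid date format for " ++ kv.1 ++ ". It must be in dd/mm/yyyy format.")
      else errors).insert kv.1 (kv.1 ++ " not allowed to change")
    else
      (if kv.1 ∈ (["LeaveStartDate", "LeaveEndDate"] : List String) then
        match pvParseDMY? kv.2 with
        | some _ => errors
        | none => errors.insert kv.1 ("Invalid date format for " ++ kv.1 ++ ". It must be in dd/mm/yyyy format.")
      else errors)) =
    (match pvClassify? kv.1 kv.2 with
     | some e => errors.insert kv.1 e
     | none => errors) := by
  unfold pvClassify?
  by_cases h1 : kv.1 ∈ (["LeaveRequestID", "EmpID"] : List String)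
  · have h2 : kv.1 ∉ (["LeaveStartDate", "LeaveEndDate"] : List String) := by
      simp only [List.mem_cons, List.not_mem_nil, or_false] at h1 ⊢
      rcases h1 with h | h <;> simp [h]
    simp [h1, h2]
  · by_cases h2 : kv.1 ∈ (["LeaveStartDate", "LeaveEndDate"] : List String)
    · cases hp : pvParseDMY? kv.2 with
      | none => simp [h1, h2, pvReformat?, hp]
      | some t =>
        obtain ⟨a, b, c⟩ := t
        simp [h1, h2, pvReformat?, hp]
    · simp [h1, h2]

-- fresh distinct keys: the fold's inserts all append
lemma pv_fold_items (l : List (String × String)) (errors : PySem.Dict String String)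
    (hfresh : ∀ kv ∈ l, errors.contains kv.1 = false) (hnd : (l.map Prod.fst).Nodup) :
    (l.foldl (fun errors kv =>
        if kv.1 ∈ (["LeaveRequestID", "EmpID"] : List String) then
          (if kv.1 ∈ (["LeaveStartDate", "LeaveEndDate"] : List String) then
            match pvParseDMY? kv.2 with
            | some _ => errors
            | none => errors.insert kv.1 ("Invalid date format for " ++ kv.1 ++ ". It must be in dd/mm/yyyy format.")
          else errors).insert kv.1 (kv.1 ++ " not allowed to change")
        else
          (if kv.1 ∈ (["LeaveStartDate", "LeaveEndDate"] : List String) then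
            match pvParseDMY? kv.2 with
            | some _ => errors
            | none => errors.insert kv.1 ("Invalid date format for " ++ kv.1 ++ ". It must be in dd/mm/yyyy format.")
          else errors)) errors).items =
      errors.items ++ l.filterMap (fun kv => (pvClassify? kv.1 kv.2).map (fun e => (kv.1, e))) := by
  induction l generalizing errors with
  | nil => simp
  | cons kv t ih =>
    simp only [List.foldl_cons, List.filterMap_cons, List.map_cons, List.nodup_cons] at *
    rw [pv_step_eq]
    cases hc : pvClassify? kv.1 kv.2 with
    | none =>
      simp only [Option.map_none]
      exact ih errors (fun x hx => hfresh x (List.mem_cons_of_mem _ hx)) hnd.2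
    | some e =>
      have hfr : errors.contains kv.1 = false := hfresh kv (List.mem_cons_self)
      have hit := PySem.Dict.items_insert_of_not_contains (d := errors) (k := kv.1) (v := e) hfr
      simp only [Option.map_some]
      rw [ih (errors.insert kv.1 e) ?_ hnd.2, hit, List.append_assoc, List.singleton_append]
      intro x hx
      rw [PySem.Dict.contains_insert]
      have hne : x.1 ≠ kv.1 := fun h => hnd.1 (h ▸ List.mem_map_of_mem hx)
      simp [hne, hfresh x (List.mem_cons_of_mem _ hx)]

-- ===== VERDICT (by name: the statement is the Claim_ definition above) =====
theorem validate_to_update_spec : Claim_equal_validate_to_update := by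
  intro obj data _
  unfold Spec_validate_to_update validate_to_update validate_to_update_alt
  have hstep := pv_fold_items (PySem.Dict.ofList data).items PySem.Dict.empty
    (fun kv _ => PySem.Dict.contains_empty kv.1)
    (by simpa [PySem.Dict.keys] using PySem.Dict.nodup_keys_ofList (ps := data))
  simpa using hstep
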